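-- pv_equiv track=rewrite | github.com/isc-hemc/ESCOM | Algorithm-Analysis/Iterative vs Recursive Algorithms/n-Cube sum/Iterative/cube.py | cube
-- ===== SOURCE A (Python) =====
-- def cube ( n ):
--     _sum, count, cubelist = 0, 1, [ ]
--     # Range: From 1 <= i <= n.
--     for i in range ( 1, n + 1 ):
--         count += 1
--         _sum = _sum + ( i * i * i )
--         count += 1
--         cubelist.append ( _sum )
--         count += 1
--     # Return statement.
--     count += 1
--     return _sum, count, cubelist
-- ===== SOURCE B (Python) =====
-- def cube(n):
--     cubelist = [(i * (i + 1) // 2) ** 2 for i in range(1, n + 1)]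
--     _sum = cubelist[-1] if cubelist else 0
--     count = 3 * n + 2 if n >= 1 else 2
--     return _sum, count, cubelist
-- ===== Notes on version B (the rewrite author's own statement) =====
-- stated objective: alternative
-- what changed: Replaces the running-accumulator loop by the closed form sum_{i<=k} i^3 = (k(k+1)//2)^2 computed independently per element of a comprehension, with the step counter obtained by the closed formula 3n+2 when n is positive and constant otherwise.
import Mathlib
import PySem

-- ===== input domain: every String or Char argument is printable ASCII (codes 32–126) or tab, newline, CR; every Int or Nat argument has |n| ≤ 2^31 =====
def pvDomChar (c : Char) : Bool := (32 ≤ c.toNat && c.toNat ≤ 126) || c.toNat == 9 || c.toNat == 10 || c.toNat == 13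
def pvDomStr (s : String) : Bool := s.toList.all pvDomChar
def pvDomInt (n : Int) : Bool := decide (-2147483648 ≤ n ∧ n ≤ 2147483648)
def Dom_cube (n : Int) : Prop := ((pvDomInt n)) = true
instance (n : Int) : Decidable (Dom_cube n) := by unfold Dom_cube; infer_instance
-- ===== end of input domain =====

-- B computes each partial sum by the closed form (i*(i+1)//2)**2 and the counter by 3n+2, instead of A's running accumulators.

-- ===== PORT A =====
-- one loop iteration of A: count += 1; _sum += i*i*i; count += 1; cubelist.append(_sum); count += 1
def cubeStep (st : Int × Int × List Int) (i : Int) : Int × Int × List Int :=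
  let c1 := st.2.1 + 1
  let s := st.1 + i * i * i
  let c2 := c1 + 1
  let l := st.2.2 ++ [s]
  let c3 := c2 + 1
  (s, c3, l)

def cube (n : Int) : Int × Int × List Int :=
  let st := (PySem.List.pyRange 1 (n + 1) 1).foldl cubeStep (0, 1, [])
  (st.1, st.2.1 + 1, st.2.2)

-- ===== PORT B =====
def cube_alt (n : Int) : Int × Int × List Int :=
  let cubelist := (PySem.List.pyRange 1 (n + 1) 1).map
    (fun i => (PySem.Int.floordiv (i * (i + 1)) 2) ^ 2)
  let s : Int := match cubelist.getLast? with
    | some x => x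
    | none => 0
  let count : Int := if 1 ≤ n then 3 * n + 2 else 2
  (s, count, cubelist)

-- ===== PRECONDITION & SPEC =====
def Spec_cube (n : Int) (out : Int × Int × List Int) : Prop := out = cube_alt n
instance (n : Int) (out : Int × Int × List Int) : Decidable (Spec_cube n out) := by unfold Spec_cube; infer_instance

-- ===== CLAIM (what is proved, stated in full; the proofs are below) =====
def Claim_equal_cube : Prop := ∀ (n : Int), Dom_cube n → Spec_cube n (cube n)

-- ===== LEMMAS AND PROOFS =====

-- the closed form for the partial sum of cubes (= B's per-element expression)
def cubeQ (x : Int) : Int := (PySem.Int.floordiv (x * (x + 1)) 2) ^ 2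

lemma cubeQ_two_mul (x : Int) :
    2 * PySem.Int.floordiv (x * (x + 1)) 2 = x * (x + 1) := by
  rw [PySem.Int.floordiv_eq_ediv_of_pos (by norm_num)]
  rw [mul_comm]
  exact Int.ediv_mul_cancel (even_iff_two_dvd.mp (Int.even_mul_succ_self x))

lemma cubeQ_succ (x : Int) :
    cubeQ x + (x + 1) * (x + 1) * (x + 1) = cubeQ (x + 1) := by
  unfold cubeQ
  have h1 := cubeQ_two_mul x
  have h2 := cubeQ_two_mul (x + 1)
  have hba : PySem.Int.floordiv ((x + 1) * ((x + 1) + 1)) 2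
      = PySem.Int.floordiv (x * (x + 1)) 2 + (x + 1) := by
    have h3 : 2 * PySem.Int.floordiv ((x + 1) * ((x + 1) + 1)) 2
        = 2 * PySem.Int.floordiv (x * (x + 1)) 2 + 2 * (x + 1) := by
      linear_combination h2 - h1
    linarith [h3]
  rw [hba]
  linear_combination (-(x + 1)) * h1

lemma cubeQ_one_add (j : Nat) :
    cubeQ (j : Int) + (1 + (j : Int)) * (1 + (j : Int)) * (1 + (j : Int)) = cubeQ (1 + (j : Int)) := by
  have e : (1 + (j : Int)) = (j : Int) + 1 := by ring
  rw [e]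
  exact cubeQ_succ (j : Int)

lemma cube_inv (m : Nat) :
    ((List.range m).map (fun k : Nat => (1 : Int) + (k : Int))).foldl cubeStep (0, 1, []) =
      (cubeQ (m : Int), 1 + 3 * (m : Int),
        (List.range m).map (fun k : Nat => cubeQ (1 + (k : Int)))) := by
  induction m with
  | zero => simp [cubeQ, PySem.Int.floordiv]
  | succ j ih =>
    rw [List.range_succ, List.map_append, List.map_append, List.foldl_append, ih]
    simp only [List.map_cons, List.map_nil, List.foldl_cons, List.foldl_nil, cubeStep]
    refine Prod.ext ?_ (Prod.ext ?_ ?_)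
    · show cubeQ (j : Int) + (1 + (j : Int)) * (1 + (j : Int)) * (1 + (j : Int)) = cubeQ ((j + 1 : Nat) : Int)
      rw [cubeQ_one_add j]
      congr 1
      push_cast
      ring
    · show 1 + 3 * (j : Int) + 1 + 1 + 1 = 1 + 3 * ((j + 1 : Nat) : Int)
      push_cast; ring
    · show _ ++ [cubeQ (j : Int) + (1 + (j : Int)) * (1 + (j : Int)) * (1 + (j : Int))] =
        _ ++ [cubeQ (1 + (j : Int))]
      rw [cubeQ_one_add j]

lemma range_arg (n : Int) : PySem.List.pyRange 1 (n + 1) 1 =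
    (List.range n.toNat).map (fun k : Nat => (1 : Int) + (k : Int)) := by
  rw [PySem.List.pyRange_one, show n + 1 - 1 = n from by ring]

-- ===== VERDICT (by name: the statement is the Claim_ definition above) =====
theorem cube_spec : Claim_equal_cube := by
  intro n _
  unfold Spec_cube cube cube_alt
  rw [range_arg, cube_inv, List.map_map]
  by_cases hn : 1 ≤ n
  · obtain ⟨j, hj⟩ : ∃ j, n.toNat = j + 1 := ⟨n.toNat - 1, by omega⟩
    rw [hj]
    refine Prod.ext ?_ (Prod.ext ?_ ?_)
    · simp only [List.range_succ, List.map_append, List.map_cons, List.map_nil,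
        List.getLast?_concat, Function.comp]
      show cubeQ ((j + 1 : Nat) : Int) =
        (PySem.Int.floordiv ((1 + (j : Int)) * ((1 + (j : Int)) + 1)) 2) ^ 2
      show cubeQ ((j + 1 : Nat) : Int) = cubeQ (1 + (j : Int))
      congr 1
      push_cast
      ring
    · show 1 + 3 * ((j + 1 : Nat) : Int) + 1 = if 1 ≤ n then 3 * n + 2 else 2
      rw [if_pos hn]
      omega
    · apply List.map_congr_left
      intro k _
      rfl
  · have h0 : n.toNat = 0 := by omega
    rw [h0]
    simp [cubeQ, if_neg hn, PySem.Int.floordiv]
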